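-- pv_equiv track=rewrite | github.com/neurobooth/neurobooth-os | extras/check_usb_topology.py | parse_pnputil
-- ===== SOURCE A (Python) =====
-- def parse_pnputil(output):
--     """Parse pnputil output into device records."""
--     devices = []
--     current = {}
--     for line in output.splitlines():
--         line = line.strip()
--         if not line:
--             if current:
--                 devices.append(current)
--                 current = {}
--             continue
--         if ":" in line:
--             key, _, value = line.partition(":")
--             current[key.strip()] = value.strip()
--     if current:
--         devices.append(current)
--     return devices
-- ===== SOURCE B (Python) =====
-- def parse_pnputil(output):
--     """Parse pnputil output into device records.
--
--     Two-phase: group stripped non-empty lines into blank-line-separated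
--     blocks, then turn each block into a record dict, keeping non-empty ones.
--     """
--     blocks = []
--     block = []
--     for raw in output.splitlines():
--         line = raw.strip()
--         if line:
--             block.append(line)
--         elif block:
--             blocks.append(block)
--             block = []
--     if block:
--         blocks.append(block)
--
--     records = []
--     for blk in blocks:
--         record = {}
--         for ln in blk:
--             if ":" in ln:
--                 key, _, value = ln.partition(":")
--                 record[key.strip()] = value.strip()
--         if record:
--             records.append(record)
--     return records
-- ===== Notes on version B (the rewrite author's own statement) =====
-- stated objective: alternative
-- what changed: Replaces the single stateful accumulator loop (dict built and flushed while scanning lines) with a two-phase group-then-parse structure: first group stripped non-empty lines into blank-separated blocks, then convert each block to a record and keep the non-empty ones.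
import Mathlib
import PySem

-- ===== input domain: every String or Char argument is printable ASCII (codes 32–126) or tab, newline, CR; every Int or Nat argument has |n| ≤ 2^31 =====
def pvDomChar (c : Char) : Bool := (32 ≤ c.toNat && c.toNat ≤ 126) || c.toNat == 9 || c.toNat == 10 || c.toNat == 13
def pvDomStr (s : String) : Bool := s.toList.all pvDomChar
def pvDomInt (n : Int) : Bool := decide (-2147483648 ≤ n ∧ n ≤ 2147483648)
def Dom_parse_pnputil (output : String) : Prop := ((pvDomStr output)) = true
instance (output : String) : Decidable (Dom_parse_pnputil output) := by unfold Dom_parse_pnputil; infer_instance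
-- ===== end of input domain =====

-- B restructures A's single stateful accumulator loop into a two-phase group-then-parse pipeline; same cost, alternative decomposition.

-- ===== PORT A =====
-- hand port of Python's line.partition(":"), exact whenever ":" occurs in line
-- (both call sites are guarded by '":" in line'); returns (head, tail-after-first-colon)
def pvPartitionColon (line : String) : String × String :=
  (String.ofList (line.toList.takeWhile (fun c => c ≠ ':')),
   String.ofList ((line.toList.dropWhile (fun c => c ≠ ':')).drop 1))

def parse_pnputil (output : String) : List (List (String × String)) :=
  let st := (PySem.Str.splitlines output).foldl
    (fun (st : List (List (String × String)) × PySem.Dict String String) line =>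
      let line := PySem.Str.strip line
      if line = "" then
        if st.2.items ≠ [] then (st.1 ++ [st.2.items], PySem.Dict.empty) else st
      else if PySem.Str.isIn ":" line then
        let kv := pvPartitionColon line
        (st.1, st.2.insert (PySem.Str.strip kv.1) (PySem.Str.strip kv.2))
      else st)
    ([], PySem.Dict.empty)
  if st.2.items ≠ [] then st.1 ++ [st.2.items] else st.1

-- ===== PORT B =====
-- phase 2 helper: one block of stripped lines → its record dict
def pvBlockDict (blk : List String) : PySem.Dict String String :=
  (blk.filter (fun ln => PySem.Str.isIn ":" ln)).foldl
    (fun d ln =>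
      let kv := pvPartitionColon ln
      d.insert (PySem.Str.strip kv.1) (PySem.Str.strip kv.2))
    PySem.Dict.empty

def parse_pnputil_alt (output : String) : List (List (String × String)) :=
  let st := (PySem.Str.splitlines output).foldl
    (fun (st : List (List String) × List String) raw =>
      let line := PySem.Str.strip raw
      if line ≠ "" then (st.1, st.2 ++ [line])
      else if st.2 ≠ [] then (st.1 ++ [st.2], []) else st)
    ([], [])
  let blocks := if st.2 ≠ [] then st.1 ++ [st.2] else st.1
  (blocks.map (fun blk => (pvBlockDict blk).items)).filter (fun r => r ≠ [])

-- ===== PRECONDITION & SPEC =====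
def Spec_parse_pnputil (output : String) (out : List (List (String × String))) : Prop := out = parse_pnputil_alt output
instance (output : String) (out : List (List (String × String))) : Decidable (Spec_parse_pnputil output out) := by unfold Spec_parse_pnputil; infer_instance

-- ===== CLAIM (what is proved, stated in full; the proofs are below) =====
def Claim_equal_parse_pnputil : Prop := ∀ (output : String), Dom_parse_pnputil output → Spec_parse_pnputil output (parse_pnputil output)

-- ===== LEMMAS AND PROOFS =====

-- the two loop bodies, named for the proofs (definitionally the lambdas in the ports)
def pvStepA (st : List (List (String × String)) × PySem.Dict String String) (line : String) :
    List (List (String × String)) × PySem.Dict String String :=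
  let line := PySem.Str.strip line
  if line = "" then
    if st.2.items ≠ [] then (st.1 ++ [st.2.items], PySem.Dict.empty) else st
  else if PySem.Str.isIn ":" line then
    let kv := pvPartitionColon line
    (st.1, st.2.insert (PySem.Str.strip kv.1) (PySem.Str.strip kv.2))
  else st

def pvStepB (st : List (List String) × List String) (raw : String) :
    List (List String) × List String :=
  let line := PySem.Str.strip raw
  if line ≠ "" then (st.1, st.2 ++ [line])
  else if st.2 ≠ [] then (st.1 ++ [st.2], []) else st

def pvFinish (bs : List (List String)) : List (List (String × String)) :=
  (bs.map (fun blk => (pvBlockDict blk).items)).filter (fun r => r ≠ [])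

lemma pvBlockDict_nil : pvBlockDict [] = PySem.Dict.empty := rfl

lemma pvBlockDict_append_colon (b : List String) (s : String)
    (h : PySem.Str.isIn ":" s = true) :
    pvBlockDict (b ++ [s]) =
      (pvBlockDict b).insert (PySem.Str.strip (pvPartitionColon s).1)
                            (PySem.Str.strip (pvPartitionColon s).2) := by
  have h' : PySem.Chars.isIn [':'] s.toList = true := by simpa using h
  simp [pvBlockDict, List.filter_append, List.foldl_append, h']

lemma pvBlockDict_append_nocolon (b : List String) (s : String)
    (h : PySem.Str.isIn ":" s = false) :
    pvBlockDict (b ++ [s]) = pvBlockDict b := by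
  have h' : PySem.Chars.isIn [':'] s.toList = false := by simpa using h
  simp [pvBlockDict, List.filter_append, List.foldl_append, h']

lemma pvFinish_append (bs : List (List String)) (b : List String) :
    pvFinish (bs ++ [b]) =
      pvFinish bs ++ (if (pvBlockDict b).items ≠ [] then [(pvBlockDict b).items] else []) := by
  simp [pvFinish, List.filter_append]
  split_ifs with h <;> simp_all

lemma pvDict_of_items_nil (d : PySem.Dict String String) (h : d.items = []) :
    d = PySem.Dict.empty := by
  apply PySem.Dict.ext; simpa using h

lemma pvLoop_eq (lines : List String) (blocks : List (List String)) (block : List String) :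
    (let st := lines.foldl pvStepA (pvFinish blocks, pvBlockDict block)
     if st.2.items ≠ [] then st.1 ++ [st.2.items] else st.1)
    =
    (let st := lines.foldl pvStepB (blocks, block)
     pvFinish (if st.2 ≠ [] then st.1 ++ [st.2] else st.1)) := by
  induction lines generalizing blocks block with
  | nil =>
    simp only [List.foldl_nil]
    by_cases hb : block = []
    · subst hb
      simp [pvBlockDict_nil, PySem.Dict.empty]
    · have e : (if block ≠ [] then blocks ++ [block] else blocks) = blocks ++ [block] := if_pos hb
      rw [e, pvFinish_append]
      split_ifs with h <;> simp_all
  | cons line rest ih =>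
    simp only [List.foldl_cons]
    by_cases hs : PySem.Str.strip line = ""
    · by_cases hb : block = []
      · subst hb
        have hA : pvStepA (pvFinish blocks, pvBlockDict []) line
            = (pvFinish blocks, pvBlockDict []) := by
          simp [pvStepA, hs, pvBlockDict_nil, PySem.Dict.empty]
        have hB : pvStepB (blocks, []) line = (blocks, []) := by
          simp [pvStepB, hs]
        rw [hA, hB]; exact ih blocks []
      · have hB : pvStepB (blocks, block) line = (blocks ++ [block], []) := by
          simp [pvStepB, hs, hb]
        rw [hB]
        by_cases hi : (pvBlockDict block).items = []
        · have hA : pvStepA (pvFinish blocks, pvBlockDict block) line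
              = (pvFinish (blocks ++ [block]), pvBlockDict []) := by
            simp [pvStepA, hs, pvFinish_append, pvDict_of_items_nil _ hi, pvBlockDict_nil, PySem.Dict.empty]
          rw [hA]; exact ih (blocks ++ [block]) []
        · have hA : pvStepA (pvFinish blocks, pvBlockDict block) line
              = (pvFinish (blocks ++ [block]), pvBlockDict []) := by
            simp [pvStepA, hs, hi, pvFinish_append, pvBlockDict_nil, PySem.Dict.empty]
          rw [hA]; exact ih (blocks ++ [block]) []
    · have hB : pvStepB (blocks, block) line
          = (blocks, block ++ [PySem.Str.strip line]) := by
        simp [pvStepB, hs]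
      rw [hB]
      by_cases hc : PySem.Str.isIn ":" (PySem.Str.strip line) = true
      · have hA : pvStepA (pvFinish blocks, pvBlockDict block) line
            = (pvFinish blocks, pvBlockDict (block ++ [PySem.Str.strip line])) := by
          have hcc : PySem.Chars.isIn [':'] (PySem.Chars.strip line.toList) = true := by simpa using hc
          simp [pvStepA, hs, hcc, pvBlockDict_append_colon _ _ hc]
        rw [hA]; exact ih blocks (block ++ [PySem.Str.strip line])
      · have hc' : PySem.Str.isIn ":" (PySem.Str.strip line) = false := by
          simpa using hc
        have hA : pvStepA (pvFinish blocks, pvBlockDict block) line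
            = (pvFinish blocks, pvBlockDict (block ++ [PySem.Str.strip line])) := by
          have hcc : PySem.Chars.isIn [':'] (PySem.Chars.strip line.toList) = false := by simpa using hc'
          simp [pvStepA, hs, hcc, pvBlockDict_append_nocolon _ _ hc']
        rw [hA]; exact ih blocks (block ++ [PySem.Str.strip line])

-- ===== VERDICT (by name: the statement is the Claim_ definition above) =====
theorem parse_pnputil_spec : Claim_equal_parse_pnputil := by
  intro output _
  show parse_pnputil output = parse_pnputil_alt output
  exact pvLoop_eq (PySem.Str.splitlines output) [] []
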